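-- pv_equiv track=rewrite | github.com/openchlai/ai | ai_service/app/model_scripts/classifier_model.py | _apply_priority_escalation
-- ===== SOURCE A (Python) =====
-- from typing import Dict, List, Optional
--
-- def _apply_priority_escalation(chunk_results: List[Dict], default_priority: str) -> str:
--     """Apply priority escalation logic for critical cases"""
--     # If any chunk indicates high priority, escalate
--     priorities_seen = [result.get("priority", "medium") for result in chunk_results]
--
--     if "high" in priorities_seen:
--         return "high"
--     elif "urgent" in priorities_seen:
--         return "urgent"
--     else:
--         return default_priority
-- ===== SOURCE B (Python) =====
-- from typing import Dict, List
--
-- def _apply_priority_escalation(chunk_results: List[Dict], default_priority: str) -> str: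
--     """Single pass: return 'high' immediately if seen; remember 'urgent' and decide after the scan."""
--     has_urgent = False
--     for result in chunk_results:
--         p = result.get("priority", "medium")
--         if p == "high":
--             return "high"
--         if p == "urgent":
--             has_urgent = True
--     return "urgent" if has_urgent else default_priority
-- ===== Notes on version B (the rewrite author's own statement) =====
-- stated objective: simpler
-- what changed: Replaced the materialized priority list plus two separate membership scans with one early-exit pass maintaining a has_urgent flag.
import Mathlib
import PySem

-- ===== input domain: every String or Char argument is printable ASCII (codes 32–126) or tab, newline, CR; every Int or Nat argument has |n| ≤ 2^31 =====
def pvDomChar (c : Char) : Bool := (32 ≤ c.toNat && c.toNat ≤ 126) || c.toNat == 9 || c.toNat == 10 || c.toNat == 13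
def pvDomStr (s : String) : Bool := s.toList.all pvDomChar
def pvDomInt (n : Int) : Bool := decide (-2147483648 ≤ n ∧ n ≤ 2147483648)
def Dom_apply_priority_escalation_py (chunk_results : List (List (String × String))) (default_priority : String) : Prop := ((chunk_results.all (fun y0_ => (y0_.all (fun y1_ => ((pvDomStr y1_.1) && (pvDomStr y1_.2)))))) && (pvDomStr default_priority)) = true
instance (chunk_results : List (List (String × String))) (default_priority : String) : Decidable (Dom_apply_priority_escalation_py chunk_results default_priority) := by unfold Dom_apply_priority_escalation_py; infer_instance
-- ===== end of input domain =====

-- B replaces A's materialized priority list and two membership scans with one early-exit pass keeping a has_urgent flag (objective: simpler).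


-- ===== PORT A =====
-- dict.get(k, default) on an insertion-order association list: first match (exact for Python dicts, whose keys are unique)
def pveDictGet (r : List (String × String)) (k dflt : String) : String :=
  match r.find? (fun kv => kv.1 == k) with
  | some kv => kv.2
  | none => dflt
def apply_priority_escalation_py (chunk_results : List (List (String × String))) (default_priority : String) : String :=
  let priorities_seen := chunk_results.map (fun result => pveDictGet result "priority" "medium")
  if priorities_seen.contains "high" then "high"
  else if priorities_seen.contains "urgent" then "urgent"
  else default_priority

-- ===== PORT B =====
-- the for-loop of Source B: early return on "high", has_urgent flag threaded through
def pveAltLoop (chunk_results : List (List (String × String))) (has_urgent : Bool) (default_priority : String) : String :=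
  match chunk_results with
  | [] => if has_urgent then "urgent" else default_priority
  | result :: rest =>
    let p := pveDictGet result "priority" "medium"
    if p = "high" then "high"
    else pveAltLoop rest (if p = "urgent" then true else has_urgent) default_priority

def apply_priority_escalation_py_alt (chunk_results : List (List (String × String))) (default_priority : String) : String :=
  pveAltLoop chunk_results false default_priority

-- ===== PRECONDITION & SPEC =====
def Spec_apply_priority_escalation_py (chunk_results : List (List (String × String))) (default_priority : String) (out : String) : Prop := out = apply_priority_escalation_py_alt chunk_results default_priority
instance (chunk_results : List (List (String × String))) (default_priority : String) (out : String) : Decidable (Spec_apply_priority_escalation_py chunk_results default_priority out) := by unfold Spec_apply_priority_escalation_py; infer_instance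

-- ===== CLAIM (what is proved, stated in full; the proofs are below) =====
def Claim_equal_apply_priority_escalation_py : Prop := ∀ (chunk_results : List (List (String × String))) (default_priority : String), Dom_apply_priority_escalation_py chunk_results default_priority → Spec_apply_priority_escalation_py chunk_results default_priority (apply_priority_escalation_py chunk_results default_priority)

-- ===== LEMMAS AND PROOFS =====
-- loop invariant: the flagged single pass equals A's list-then-two-scans formulation
theorem pveAltLoop_eq (chunk_results : List (List (String × String))) (u : Bool) (d : String) :
    pveAltLoop chunk_results u d =
      (let ps := chunk_results.map (fun r => pveDictGet r "priority" "medium")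
       if ps.contains "high" then "high"
       else if u || ps.contains "urgent" then "urgent" else d) := by
  induction chunk_results generalizing u with
  | nil => simp [pveAltLoop]
  | cons r rest ih =>
    simp only [pveAltLoop, List.map_cons, List.contains_cons, ih]
    by_cases h1 : pveDictGet r "priority" "medium" = "high"
    · simp [h1]
    · by_cases h2 : pveDictGet r "priority" "medium" = "urgent"
      · simp [h1, h2, Ne.symm h1]
      · simp [h1, h2, Ne.symm h1, Ne.symm h2]

-- ===== VERDICT (by name: the statement is the Claim_ definition above) =====
theorem apply_priority_escalation_py_spec : Claim_equal_apply_priority_escalation_py := by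
  intro chunk_results default_priority _
  unfold Spec_apply_priority_escalation_py apply_priority_escalation_py apply_priority_escalation_py_alt
  rw [pveAltLoop_eq]
  simp
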